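-- pv_equiv track=rewrite | github.com/masthom/Music-History-Knowledge-Graph | utils/Hexachord_rotations_allForms2.py | triple_rowclass_hasRowForms_block
-- ===== SOURCE A (Python) =====
-- from typing import List
--
-- def fmt(seq: List[int]) -> str:
--     return "_".join(str(x) for x in seq)
--
-- def triple_rowclass_hasRowForms_block(hex_rowclass: List[int], forms_groups: dict) -> str:
--     """
--     Erzeugt einen Turtle-Block:
--     mhg:<rowClass> a mhg:rowClass ;
--         mhg:hasRowForm
--        # P
--        mhg:... ,
--        mhg:... ;
--     .
--     forms_groups: dict mit keys 'P','I','R','RI' -> list of row-lists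
--     """
--     subj = "mhg:" + fmt(hex_rowclass)
--     lines = []
--     lines.append(f"{subj} a mhg:rowClass ;")
--     lines.append("    mhg:hasRowForm")
--     # P (Prime forms)
--     # We will format each list as comma separated qnames, and keep groups separated by newlines and comments
--     all_lines = []
--     # Helper to convert row -> qname
--     def q(r): return "mhg:" + fmt(r)
--     # P
--     p_list = forms_groups.get("P", [])
--     if p_list:
--         lines.append("   # P")
--         for i, r in enumerate(p_list):
--             comma = "," if i < len(p_list)-1 or any(forms_groups.get(k) for k in ("I","R","RI")) else ""
--             lines.append(f"   {q(r)}{comma}")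
--     # I
--     i_list = forms_groups.get("I", [])
--     if i_list:
--         # If P was present and last printed did not add comma, ensure comma separation is correct.
--         # To keep Turtle valid, above approach prints each triple line; we'll join with newline and then ensure final termination with '.' later.
--         lines.append("   # I")
--         for i, r in enumerate(i_list):
--             comma = "," if i < len(i_list)-1 or any(forms_groups.get(k) for k in ("R","RI")) else ""
--             lines.append(f"   {q(r)}{comma}")
--     # R
--     r_list = forms_groups.get("R", [])
--     if r_list:
--         lines.append("   # R")
--         for i, r in enumerate(r_list):
--             comma = "," if i < len(r_list)-1 or any(forms_groups.get(k) for k in ("RI",)) else ""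
--             lines.append(f"   {q(r)}{comma}")
--     # RI
--     ri_list = forms_groups.get("RI", [])
--     if ri_list:
--         lines.append("   # RI")
--         for i, r in enumerate(ri_list):
--             comma = "," if i < len(ri_list)-1 else ""
--             lines.append(f"   {q(r)}{comma}")
--     # End block with a period. Ensure last printed line ends without trailing comma.
--     # If the last line has a trailing comma it's allowed in Turtle? No — we must ensure the last item has no comma.
--     # Our above logic tries to avoid comma on last element.
--     # Append terminating semicolon? In structure we used 'a mhg:rowClass ;' then 'mhg:hasRowForm ...' so we must end with '.'
--     lines.append("   .")
--     return "\n".join(lines)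
-- ===== SOURCE B (Python) =====
-- from typing import List
--
-- def fmt(seq: List[int]) -> str:
--     return "_".join(str(x) for x in seq)
--
-- def triple_rowclass_hasRowForms_block(hex_rowclass: List[int], forms_groups: dict) -> str:
--     # Single uniform pass over the present groups; comma on every row except the
--     # globally last one (running counter against the total row count).
--     groups = [(k, v) for k in ("P", "I", "R", "RI")
--               for v in [forms_groups.get(k) or []] if v]
--     total = sum(len(v) for _, v in groups)
--     lines = ["mhg:" + fmt(hex_rowclass) + " a mhg:rowClass ;",
--              "    mhg:hasRowForm"]
--     idx = 0
--     for k, v in groups: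
--         lines.append("   # " + k)
--         for r in v:
--             idx += 1
--             lines.append("   mhg:" + fmt(r) + ("," if idx < total else ""))
--     lines.append("   .")
--     return "\n".join(lines)
-- ===== Notes on version B (the rewrite author's own statement) =====
-- stated objective: simpler
-- what changed: A's four copy-pasted per-group blocks, each with its own look-ahead any()-based comma rule, are replaced by one uniform pass over the pre-filtered list of present groups that carries a running row counter and appends a comma on every row except the globally last one.
import Mathlib
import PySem

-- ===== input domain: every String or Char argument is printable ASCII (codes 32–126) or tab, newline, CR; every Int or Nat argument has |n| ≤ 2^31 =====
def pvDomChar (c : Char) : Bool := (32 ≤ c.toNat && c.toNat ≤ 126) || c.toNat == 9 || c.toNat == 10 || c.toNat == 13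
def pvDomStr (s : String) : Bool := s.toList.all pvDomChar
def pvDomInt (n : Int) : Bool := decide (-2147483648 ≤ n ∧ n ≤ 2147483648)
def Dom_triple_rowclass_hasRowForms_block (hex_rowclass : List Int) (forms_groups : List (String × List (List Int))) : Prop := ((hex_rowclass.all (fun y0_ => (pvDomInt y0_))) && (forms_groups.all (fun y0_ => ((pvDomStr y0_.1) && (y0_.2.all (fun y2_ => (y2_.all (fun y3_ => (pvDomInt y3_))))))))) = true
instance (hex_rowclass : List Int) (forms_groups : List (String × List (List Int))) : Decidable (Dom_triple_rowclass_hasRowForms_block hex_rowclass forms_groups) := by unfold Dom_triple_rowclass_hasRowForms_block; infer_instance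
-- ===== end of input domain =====

-- B replaces A's four copy-pasted group blocks (each with its own look-ahead comma rule) by one
-- uniform pass over the pre-filtered present groups with a running row counter; objective: simpler.

-- ===== PORT A =====
-- fmt(seq) = "_".join(str(x) for x in seq)
def pvFmt (seq : List Int) : String := PySem.Str.join "_" (seq.map PySem.Int.toStr)

-- inner helper q(r) = "mhg:" + fmt(r)
def pvQ (r : List Int) : String := "mhg:" ++ pvFmt r

-- truthiness of forms_groups.get(k): a present, non-empty list
def pvTruthy (forms_groups : List (String × List (List Int))) (k : String) : Bool :=
  match (PySem.Dict.mk forms_groups).get? k with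
  | some l => !l.isEmpty
  | none => false

def triple_rowclass_hasRowForms_block (hex_rowclass : List Int) (forms_groups : List (String × List (List Int))) : String :=
  let subj := "mhg:" ++ pvFmt hex_rowclass
  let lines : List String := [subj ++ " a mhg:rowClass ;", "    mhg:hasRowForm"]
  let p_list := (PySem.Dict.mk forms_groups).getD "P" []
  let lines := if !p_list.isEmpty then
      lines ++ ["   # P"] ++ (PySem.List.enumerate p_list).map (fun ir =>
        let comma := if ir.1 < (p_list.length : Int) - 1 ∨ (["I", "R", "RI"].any (fun k => pvTruthy forms_groups k)) = true then "," else ""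
        "   " ++ pvQ ir.2 ++ comma)
    else lines
  let i_list := (PySem.Dict.mk forms_groups).getD "I" []
  let lines := if !i_list.isEmpty then
      lines ++ ["   # I"] ++ (PySem.List.enumerate i_list).map (fun ir =>
        let comma := if ir.1 < (i_list.length : Int) - 1 ∨ (["R", "RI"].any (fun k => pvTruthy forms_groups k)) = true then "," else ""
        "   " ++ pvQ ir.2 ++ comma)
    else lines
  let r_list := (PySem.Dict.mk forms_groups).getD "R" []
  let lines := if !r_list.isEmpty then
      lines ++ ["   # R"] ++ (PySem.List.enumerate r_list).map (fun ir =>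
        let comma := if ir.1 < (r_list.length : Int) - 1 ∨ (["RI"].any (fun k => pvTruthy forms_groups k)) = true then "," else ""
        "   " ++ pvQ ir.2 ++ comma)
    else lines
  let ri_list := (PySem.Dict.mk forms_groups).getD "RI" []
  let lines := if !ri_list.isEmpty then
      lines ++ ["   # RI"] ++ (PySem.List.enumerate ri_list).map (fun ir =>
        let comma := if ir.1 < (ri_list.length : Int) - 1 then "," else ""
        "   " ++ pvQ ir.2 ++ comma)
    else lines
  let lines := lines ++ ["   ."]
  PySem.Str.join "\n" lines

-- ===== PORT B =====
def triple_rowclass_hasRowForms_block_alt (hex_rowclass : List Int) (forms_groups : List (String × List (List Int))) : String :=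
  let groups := (["P", "I", "R", "RI"].map (fun k => (k, (PySem.Dict.mk forms_groups).getD k []))).filter (fun kv => !kv.2.isEmpty)
  let total : Int := (groups.map (fun kv => (kv.2.length : Int))).sum
  let lines : List String := ["mhg:" ++ pvFmt hex_rowclass ++ " a mhg:rowClass ;", "    mhg:hasRowForm"]
  let st := groups.foldl (fun (st : Int × List String) kv =>
      kv.2.foldl (fun (st : Int × List String) r =>
          (st.1 + 1, st.2 ++ ["   mhg:" ++ pvFmt r ++ (if st.1 + 1 < total then "," else "")]))
        (st.1, st.2 ++ ["   # " ++ kv.1]))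
      ((0 : Int), lines)
  PySem.Str.join "\n" (st.2 ++ ["   ."])

-- ===== PRECONDITION & SPEC =====
def Spec_triple_rowclass_hasRowForms_block (hex_rowclass : List Int) (forms_groups : List (String × List (List Int))) (out : String) : Prop := out = triple_rowclass_hasRowForms_block_alt hex_rowclass forms_groups
instance (hex_rowclass : List Int) (forms_groups : List (String × List (List Int))) (out : String) : Decidable (Spec_triple_rowclass_hasRowForms_block hex_rowclass forms_groups out) := by unfold Spec_triple_rowclass_hasRowForms_block; infer_instance

-- ===== CLAIM (what is proved, stated in full; the proofs are below) =====
def Claim_equal_triple_rowclass_hasRowForms_block : Prop := ∀ (hex_rowclass : List Int) (forms_groups : List (String × List (List Int))), Dom_triple_rowclass_hasRowForms_block hex_rowclass forms_groups → Spec_triple_rowclass_hasRowForms_block hex_rowclass forms_groups (triple_rowclass_hasRowForms_block hex_rowclass forms_groups)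

-- ===== LEMMAS AND PROOFS =====

theorem pvLit : ("   " ++ "mhg:" : String) = "   mhg:" := by decide

theorem pvQ_str (r : List Int) : "   " ++ pvQ r = "   mhg:" ++ pvFmt r := by
  rw [pvQ, ← String.append_assoc, pvLit]

theorem pvTruthy_eq (forms_groups : List (String × List (List Int))) (k : String) :
    pvTruthy forms_groups k = !((PySem.Dict.mk forms_groups).getD k []).isEmpty := by
  unfold pvTruthy PySem.Dict.getD
  cases (PySem.Dict.mk forms_groups).get? k <;> simp

-- row count of a group list (B's `total` expression)
def pvRC (gs : List (String × List (List Int))) : Int := (gs.map (fun kv => (kv.2.length : Int))).sum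

-- B's rows for one group, starting at running index c against total T
def pvRowsB (T : Int) : List (List Int) → Int → List String
  | [], _ => []
  | r :: l, c => ("   mhg:" ++ pvFmt r ++ (if c + 1 < T then "," else "")) :: pvRowsB T l (c + 1)

-- B's full expansion of a (filtered) group list starting at running index c
def pvExpB (T : Int) : List (String × List (List Int)) → Int → List String
  | [], _ => []
  | (k, l) :: gs, c => ("   # " ++ k) :: (pvRowsB T l c ++ pvExpB T gs (c + l.length))

-- some group in gs is non-empty
def pvAnyNE (gs : List (String × List (List Int))) : Bool := gs.any (fun kv => !kv.2.isEmpty)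

-- A's expansion: per group, comma if not last in the group or some later group is non-empty
def pvExpA : List (String × List (List Int)) → List String
  | [] => []
  | (k, l) :: gs =>
      (if !l.isEmpty then
        ("   # " ++ k) :: (PySem.List.enumerate l).map (fun ir =>
          "   " ++ pvQ ir.2 ++ (if ir.1 < (l.length : Int) - 1 ∨ pvAnyNE gs = true then "," else ""))
      else []) ++ pvExpA gs

theorem pvInner (T : Int) (l : List (List Int)) : ∀ (c : Int) (acc : List String),
    l.foldl (fun (st : Int × List String) r =>
        (st.1 + 1, st.2 ++ ["   mhg:" ++ pvFmt r ++ (if st.1 + 1 < T then "," else "")])) (c, acc)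
    = (c + l.length, acc ++ pvRowsB T l c) := by
  induction l with
  | nil => intro c acc; simp [pvRowsB]
  | cons r l ih =>
      intro c acc
      simp only [List.foldl_cons, ih, pvRowsB, List.length_cons, Prod.mk.injEq]
      refine ⟨by push_cast; ring, by simp⟩

theorem pvGroups (T : Int) (gs : List (String × List (List Int))) : ∀ (c : Int) (acc : List String),
    gs.foldl (fun (st : Int × List String) kv =>
        kv.2.foldl (fun (st : Int × List String) r =>
            (st.1 + 1, st.2 ++ ["   mhg:" ++ pvFmt r ++ (if st.1 + 1 < T then "," else "")]))
          (st.1, st.2 ++ ["   # " ++ kv.1])) (c, acc)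
    = (c + pvRC gs, acc ++ pvExpB T gs c) := by
  induction gs with
  | nil => intro c acc; simp [pvRC, pvExpB]
  | cons kv gs ih =>
      intro c acc
      obtain ⟨k, l⟩ := kv
      rw [List.foldl_cons]
      show (gs.foldl _ ((l.foldl _ (c, acc ++ ["   # " ++ k]) : Int × List String))) = _
      rw [pvInner, ih]
      simp only [pvExpB, pvRC, List.map_cons, List.sum_cons, Prod.mk.injEq]
      refine ⟨by ring, by simp⟩

theorem pvRows_eq (T : Int) (t : Bool) (n : Int) : ∀ (l : List (List Int)) (s c : Int),
    s + l.length = n → c + l.length ≤ T → ((t = true) ↔ c + l.length < T) →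
    (PySem.List.enumerate l s).map (fun ir =>
        "   " ++ pvQ ir.2 ++ (if ir.1 < n - 1 ∨ t = true then "," else ""))
    = pvRowsB T l c := by
  intro l
  induction l with
  | nil => intro s c _ _ _; simp [pvRowsB]
  | cons r l ih =>
      intro s c hn hle ht
      rw [PySem.List.enumerate_cons]
      simp only [List.map_cons, pvRowsB, List.length_cons] at *
      push_cast at hn hle ht
      have hiff : (s < n - 1 ∨ t = true) ↔ c + 1 < T := by
        constructor
        · rintro (h | h)
          · omega
          · have := ht.mp h; omega
        · intro h
          by_cases hl : l.length = 0
          · exact Or.inr (ht.mpr (by omega))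
          · exact Or.inl (by omega)
      have hhead : ("   " ++ pvQ r ++ if s < n - 1 ∨ t = true then "," else "")
          = ("   mhg:" ++ pvFmt r ++ if c + 1 < T then "," else "") := by
        rw [pvQ_str]
        by_cases hc : c + 1 < T
        · rw [if_pos (hiff.mpr hc), if_pos hc]
        · rw [if_neg (fun h => hc (hiff.mp h)), if_neg hc]
      rw [hhead, ih (s + 1) (c + 1) (by omega) (by omega)
        ⟨fun h => by have := ht.mp h; omega, fun h => ht.mpr (by omega)⟩]

theorem pvRC_nonneg (gs : List (String × List (List Int))) : 0 ≤ pvRC gs := by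
  induction gs with
  | nil => simp [pvRC]
  | cons kv gs ih => simp only [pvRC, List.map_cons, List.sum_cons] at *; positivity

theorem pvRC_filter (gs : List (String × List (List Int))) :
    pvRC (gs.filter (fun kv => !kv.2.isEmpty)) = pvRC gs := by
  induction gs with
  | nil => rfl
  | cons kv gs ih =>
      by_cases h : kv.2.isEmpty
      · rw [List.filter_cons_of_neg (by simp [h])]
        have : kv.2.length = 0 := by simpa [List.isEmpty_iff_length_eq_zero] using h
        simp [pvRC, this] at ih ⊢; omega
      · rw [List.filter_cons_of_pos (by simp [h])]
        simp [pvRC] at ih ⊢; omega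

theorem pvAnyNE_iff (gs : List (String × List (List Int))) :
    pvAnyNE gs = true ↔ 0 < pvRC gs := by
  induction gs with
  | nil => simp [pvAnyNE, pvRC]
  | cons kv gs ih =>
      have h2 := pvRC_nonneg gs
      simp only [pvAnyNE, List.any_cons, Bool.or_eq_true, pvRC, List.map_cons, List.sum_cons] at *
      constructor
      · rintro (h | h)
        · have : kv.2.length ≠ 0 := by simpa [List.isEmpty_iff_length_eq_zero] using h
          omega
        · have := ih.mp h; omega
      · intro h
        by_cases hk : kv.2.isEmpty
        · right
          apply ih.mpr
          have : kv.2.length = 0 := by simpa [List.isEmpty_iff_length_eq_zero] using hk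
          omega
        · left; simp [hk]

theorem pvExp_eq (T : Int) : ∀ (gs : List (String × List (List Int))) (c : Int),
    c + pvRC gs = T →
    pvExpB T (gs.filter (fun kv => !kv.2.isEmpty)) c = pvExpA gs := by
  intro gs
  induction gs with
  | nil => intro c _; rfl
  | cons kv gs ih =>
      intro c hT
      obtain ⟨k, l⟩ := kv
      by_cases h : l.isEmpty
      · rw [List.filter_cons_of_neg (by simp [h])]
        have hl : l.length = 0 := by simpa [List.isEmpty_iff_length_eq_zero] using h
        rw [pvExpA]
        simp only [h, Bool.not_true, Bool.false_eq_true, if_false, List.nil_append]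
        apply ih
        simp [pvRC, hl] at hT ⊢; omega
      · rw [List.filter_cons_of_pos (by simp [h])]
        rw [pvExpB, pvExpA]
        simp only [h, Bool.not_false, if_true]
        have hrc : pvRC ((k, l) :: gs) = l.length + pvRC gs := by simp [pvRC]
        have h2 := pvRC_nonneg gs
        rw [List.cons_append]
        congr 1
        congr 1
        · exact (pvRows_eq T (pvAnyNE gs) (l.length : Int) l 0 c (by simp) (by omega)
            (by rw [pvAnyNE_iff]; omega)).symm
        · apply ih; omega

theorem pvIfApp {α : Type} (c : Prop) [Decidable c] (x y : List α) :
    (if c then x ++ y else x) = x ++ (if c then y else []) := by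
  split_ifs <;> simp

theorem triple_rowclass_hasRowForms_block_eq (hex_rowclass : List Int) (forms_groups : List (String × List (List Int))) :
    triple_rowclass_hasRowForms_block hex_rowclass forms_groups
    = triple_rowclass_hasRowForms_block_alt hex_rowclass forms_groups := by
  unfold triple_rowclass_hasRowForms_block triple_rowclass_hasRowForms_block_alt
  dsimp only
  rw [pvGroups]
  rw [pvExp_eq _ _ 0 (by rw [zero_add, ← pvRC_filter]; rfl)]
  simp only [List.map_cons, List.map_nil]
  congr 1
  simp only [pvExpA, pvAnyNE, List.any_cons, List.any_nil, pvTruthy_eq, List.append_assoc]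
  rw [pvIfApp, pvIfApp, pvIfApp, pvIfApp]
  simp only [List.append_assoc, List.singleton_append, List.nil_append, Bool.or_false]
  rw [show ("   # " ++ "P" : String) = "   # P" from by decide,
    show ("   # " ++ "I" : String) = "   # I" from by decide,
    show ("   # " ++ "R" : String) = "   # R" from by decide,
    show ("   # " ++ "RI" : String) = "   # RI" from by decide]
  simp only [Bool.false_eq_true, or_false]

-- ===== VERDICT (by name: the statement is the Claim_ definition above) =====
theorem triple_rowclass_hasRowForms_block_spec : Claim_equal_triple_rowclass_hasRowForms_block := by
  intro hex_rowclass forms_groups _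
  unfold Spec_triple_rowclass_hasRowForms_block
  exact triple_rowclass_hasRowForms_block_eq hex_rowclass forms_groups
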